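-- pv_equiv track=rewrite | github.com/YohanWloczysiak/projet_info_S2 | projet_info_0305_new_version.py | traverse_fou
-- ===== SOURCE A (Python) =====
-- def traverse_fou(a, b, X, Y, plateau) :
--     if (X - a) > 0 and (Y - b) > 0 :            # X - a = Y - b = k
--         for i in range(a+1, X) :
--             j = Y+i-X
--             if plateau[i, j][3] != 0 :
--                 return False
--     elif (X - a) > 0 and (Y - b) < 0 :         # X - a = k et Y - b = -k
--         for i in range(X-1, a, -1) :
--             j = Y-i+X
--             if plateau[i, j][3] != 0 :
--                 return False
--     elif (X - a) < 0 and (Y - b) < 0 :         # X - a = Y - b = -k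
--         for i in range(X+1, a) :
--             j = Y+i-X
--             if plateau[i, j][3] != 0 :
--                 return False
--     elif (X - a) < 0 and (Y - b) > 0 :          # X - a = -k et Y - b = k
--         for i in range(X + 1, a) :
--             j = Y-i+X
--             if plateau[i, j][3] != 0 :
--                 return False
--     return True
-- ===== SOURCE B (Python) =====
-- def traverse_fou(a, b, X, Y, plateau):
--     if X == a or Y == b:
--         return True
--     lo, hi = min(a, X), max(a, X)
--     slope = 1 if (X - a) * (Y - b) > 0 else -1
--     c = Y - slope * X                     # path: j = slope*i + c for lo < i < hi
--     for (i, j), v in plateau.items():     # scan the pieces, not the path cells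
--         if lo < i < hi and j == slope * i + c and v[3] != 0:
--             return False
--     return True
-- ===== Notes on version B (the rewrite author's own statement) =====
-- stated objective: alternative
-- what changed: Instead of walking the path cells and looking each one up in the dict (four sign-case loops), B derives the line equation j = slope*i + c of the diagonal and makes one pass over the board's entries, rejecting as soon as some stored piece lies strictly between the endpoints on that line.
import Mathlib
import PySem

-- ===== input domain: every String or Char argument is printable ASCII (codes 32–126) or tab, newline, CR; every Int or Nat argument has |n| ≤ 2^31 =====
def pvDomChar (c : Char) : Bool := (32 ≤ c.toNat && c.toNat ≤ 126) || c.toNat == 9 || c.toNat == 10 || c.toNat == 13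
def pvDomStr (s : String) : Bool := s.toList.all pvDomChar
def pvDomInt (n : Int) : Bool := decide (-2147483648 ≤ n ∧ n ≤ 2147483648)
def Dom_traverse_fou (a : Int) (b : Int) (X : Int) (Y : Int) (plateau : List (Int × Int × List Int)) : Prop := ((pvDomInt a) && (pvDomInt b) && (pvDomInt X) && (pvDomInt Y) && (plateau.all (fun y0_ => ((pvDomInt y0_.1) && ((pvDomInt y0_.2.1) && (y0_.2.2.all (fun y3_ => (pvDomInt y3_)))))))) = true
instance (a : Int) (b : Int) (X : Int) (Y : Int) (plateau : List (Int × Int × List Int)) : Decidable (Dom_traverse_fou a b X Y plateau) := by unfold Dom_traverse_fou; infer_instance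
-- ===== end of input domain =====

-- ===== PORT A =====
-- B replaces A's four path-walking loops (dict lookup per path cell) by a single pass over
-- the board's entries against the line equation of the diagonal ("alternative"); equal on
-- Pre_ (distinct keys, every visited path cell present with a 4th component).
-- plateau[i, j][3]: KeyError/IndexError replaced by a default (such inputs are outside Pre_)
def pvCell (plateau : List (Int × Int × List Int)) (i j : Int) : Int :=
  ((((plateau.find? (fun e => decide (e.1 = i ∧ e.2.1 = j))).map (·.2.2)).getD []).getD 3 0)

def pvLoopA (plateau : List (Int × Int × List Int)) (jf : Int → Int) : List Int → Bool
  | [] => true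
  | i :: rest => if pvCell plateau i (jf i) ≠ 0 then false else pvLoopA plateau jf rest

def traverse_fou (a : Int) (b : Int) (X : Int) (Y : Int) (plateau : List (Int × Int × List Int)) : Bool :=
  if X - a > 0 ∧ Y - b > 0 then
    pvLoopA plateau (fun i => Y + i - X) (PySem.List.pyRange (a + 1) X 1)
  else if X - a > 0 ∧ Y - b < 0 then
    pvLoopA plateau (fun i => Y - i + X) (PySem.List.pyRange (X - 1) a (-1))
  else if X - a < 0 ∧ Y - b < 0 then
    pvLoopA plateau (fun i => Y + i - X) (PySem.List.pyRange (X + 1) a 1)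
  else if X - a < 0 ∧ Y - b > 0 then
    pvLoopA plateau (fun i => Y - i + X) (PySem.List.pyRange (X + 1) a 1)
  else true

-- ===== PORT B =====
-- the for-loop over plateau.items() with early return False
def pvScanB (lo hi slope c : Int) : List (Int × Int × List Int) → Bool
  | [] => true
  | e :: rest =>
    if lo < e.1 ∧ e.1 < hi ∧ e.2.1 = slope * e.1 + c ∧ e.2.2.getD 3 0 ≠ 0 then false
    else pvScanB lo hi slope c rest

def traverse_fou_alt (a : Int) (b : Int) (X : Int) (Y : Int) (plateau : List (Int × Int × List Int)) : Bool :=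
  if X = a ∨ Y = b then true
  else
    let slope : Int := if (X - a) * (Y - b) > 0 then 1 else -1
    pvScanB (min a X) (max a X) slope (Y - slope * X) plateau

-- ===== PRECONDITION & SPEC =====
-- Pre_ excludes inputs where the Python A raises KeyError/IndexError on some visited path
-- cell (cell absent, or its list shorter than 4), and plateau lists with duplicate (i,j)
-- keys, which cannot arise from a Python dict and on which first-match order is accidental.
def pvOk (plateau : List (Int × Int × List Int)) (i j : Int) : Bool :=
  match plateau.find? (fun e => decide (e.1 = i ∧ e.2.1 = j)) with
  | some e => 4 ≤ e.2.2.length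
  | none => false

def Pre_traverse_fou (a : Int) (b : Int) (X : Int) (Y : Int) (plateau : List (Int × Int × List Int)) : Prop :=
  X = a ∨ Y = b ∨
    ((max a X - min a X - 1 ≤ plateau.length) ∧  -- implied bound (each visited i needs its own entry); lets the instance short-circuit
    (plateau.map (fun e => (e.1, e.2.1))).Nodup ∧
    ∀ i ∈ PySem.List.pyRange (min a X + 1) (max a X) 1,
      pvOk plateau i (if (X - a) * (Y - b) > 0 then Y + i - X else Y - i + X) = true)
instance (a : Int) (b : Int) (X : Int) (Y : Int) (plateau : List (Int × Int × List Int)) : Decidable (Pre_traverse_fou a b X Y plateau) := by unfold Pre_traverse_fou; infer_instance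

def pvWitness_traverse_fou : Int × Int × Int × Int × (List (Int × Int × List Int)) :=
  (0, 0, 2, 2, [(1, 1, [0, 0, 0, 0])])

def Spec_traverse_fou (a : Int) (b : Int) (X : Int) (Y : Int) (plateau : List (Int × Int × List Int)) (out : Bool) : Prop := out = traverse_fou_alt a b X Y plateau
instance (a : Int) (b : Int) (X : Int) (Y : Int) (plateau : List (Int × Int × List Int)) (out : Bool) : Decidable (Spec_traverse_fou a b X Y plateau out) := by unfold Spec_traverse_fou; infer_instance

-- ===== CLAIM (what is proved, stated in full; the proofs are below) =====
def Claim_equal_traverse_fou : Prop := ∀ (a : Int) (b : Int) (X : Int) (Y : Int) (plateau : List (Int × Int × List Int)), Dom_traverse_fou a b X Y plateau → Pre_traverse_fou a b X Y plateau → Spec_traverse_fou a b X Y plateau (traverse_fou a b X Y plateau)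

-- ===== LEMMAS AND PROOFS =====
-- A's early-return loop equals an all-scan over the visited i's
theorem pvLoopA_eq_all (plateau : List (Int × Int × List Int)) (jf : Int → Int) (l : List Int) :
    pvLoopA plateau jf l = l.all (fun i => pvCell plateau i (jf i) == 0) := by
  induction l with
  | nil => rfl
  | cons i rest ih =>
      simp only [pvLoopA, List.all_cons, ih]
      by_cases h : pvCell plateau i (jf i) = 0 <;> simp [h]

-- B's early-return loop equals an all-scan over the entries
theorem pvScanB_eq_all (lo hi slope c : Int) (l : List (Int × Int × List Int)) :
    pvScanB lo hi slope c l =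
      l.all (fun e => !(decide (lo < e.1 ∧ e.1 < hi ∧ e.2.1 = slope * e.1 + c ∧ e.2.2.getD 3 0 ≠ 0))) := by
  induction l with
  | nil => rfl
  | cons e rest ih =>
      simp only [pvScanB, List.all_cons, ih]
      by_cases h : lo < e.1 ∧ e.1 < hi ∧ e.2.1 = slope * e.1 + c ∧ e.2.2.getD 3 0 ≠ 0 <;> simp [h]

-- with nodup keys, a member matching a key pair IS the first match
theorem find?_of_mem_nodup (plateau : List (Int × Int × List Int)) (e : Int × Int × List Int)
    (hnd : (plateau.map (fun e => (e.1, e.2.1))).Nodup) (hm : e ∈ plateau) :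
    plateau.find? (fun e' => decide (e'.1 = e.1 ∧ e'.2.1 = e.2.1)) = some e := by
  induction plateau with
  | nil => cases hm
  | cons x rest ih =>
      simp only [List.map_cons, List.nodup_cons] at hnd
      rcases List.mem_cons.mp hm with h | h
      · subst h; simp [List.find?]
      · have hx : ¬(x.1 = e.1 ∧ x.2.1 = e.2.1) := by
          intro hc
          exact hnd.1 (by
            have : (x.1, x.2.1) = (e.1, e.2.1) := by rw [hc.1, hc.2]
            rw [this]; exact List.mem_map_of_mem h)
        simp only [List.find?_cons, decide_eq_false hx]
        exact ih hnd.2 h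

-- path-walk (first-match lookup per visited i) = piece-scan (line-equation test per entry)
theorem path_eq_scan (plateau : List (Int × Int × List Int)) (lo hi slope c : Int)
    (hnd : (plateau.map (fun e => (e.1, e.2.1))).Nodup) :
    ((PySem.List.pyRange (lo + 1) hi 1).all fun i => pvCell plateau i (slope * i + c) == 0)
      = pvScanB lo hi slope c plateau := by
  rw [pvScanB_eq_all, Bool.eq_iff_iff]
  simp only [List.all_eq_true, PySem.List.mem_pyRange_one, beq_iff_eq, Bool.not_eq_eq_eq_not,
    Bool.not_true, decide_eq_false_iff_not, not_and, not_not]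
  constructor
  · intro h e he h1 h2 h3
    have := h e.1 ⟨by omega, h2⟩
    rwa [← h3, pvCell, find?_of_mem_nodup plateau e hnd he] at this
  · intro h i hi
    unfold pvCell
    cases hf : plateau.find? (fun e' => decide (e'.1 = i ∧ e'.2.1 = slope * i + c)) with
    | none => rfl
    | some e =>
        have hm := List.mem_of_find?_eq_some hf
        have hp := List.find?_some hf
        simp only [decide_eq_true_eq] at hp
        have := h e hm (by omega) (by omega) (by rw [hp.2, hp.1])
        simpa [hp.1, hp.2] using this

theorem main_eq (a b X Y : Int) (plateau : List (Int × Int × List Int))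
    (hnd : X = a ∨ Y = b ∨ (plateau.map (fun e => (e.1, e.2.1))).Nodup) :
    traverse_fou a b X Y plateau = traverse_fou_alt a b X Y plateau := by
  unfold traverse_fou traverse_fou_alt
  by_cases hXa : X = a
  · subst hXa; simp
  by_cases hYb : Y = b
  · subst hYb; simp
  rw [if_neg (show ¬(X = a ∨ Y = b) from by tauto)]
  have hnd : (plateau.map (fun e => (e.1, e.2.1))).Nodup := by tauto
  rcases lt_trichotomy a X with h1 | h1 | h1
  · rcases lt_trichotomy b Y with h2 | h2 | h2
    · -- X > a, Y > b : slope 1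
      have hs : (X - a) * (Y - b) > 0 := mul_pos (by omega) (by omega)
      rw [if_pos hs, if_pos ⟨by omega, by omega⟩, pvLoopA_eq_all,
        min_eq_left (le_of_lt h1), max_eq_right (le_of_lt h1),
        ← path_eq_scan plateau a X 1 (Y - 1 * X) hnd]
      congr 1; funext i; norm_num; ring_nf
    · omega
    · -- X > a, Y < b : A counts down, slope -1
      have hs : ¬ (X - a) * (Y - b) > 0 := by
        have := mul_pos_iff (a := X - a) (b := Y - b); omega
      rw [if_neg hs, if_neg (by omega), if_pos ⟨by omega, by omega⟩, pvLoopA_eq_all]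
      have hr : PySem.List.pyRange (X - 1) a (-1) = (PySem.List.pyRange (a + 1) X 1).reverse := by
        have := PySem.List.pyRange_neg_one_eq_reverse (X - 1) a
        simpa using this
      rw [hr, List.all_reverse,
        min_eq_left (le_of_lt h1), max_eq_right (le_of_lt h1),
        ← path_eq_scan plateau a X (-1) (Y - (-1) * X) hnd]
      congr 1; funext i; norm_num; ring_nf
  · omega
  · rcases lt_trichotomy b Y with h2 | h2 | h2
    · -- X < a, Y > b : slope -1
      have hs : ¬ (X - a) * (Y - b) > 0 := by
        have := mul_pos_iff (a := X - a) (b := Y - b); omega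
      rw [if_neg hs, if_neg (by omega), if_neg (by omega), if_neg (by omega),
        if_pos ⟨by omega, by omega⟩, pvLoopA_eq_all,
        min_eq_right (le_of_lt h1), max_eq_left (le_of_lt h1),
        ← path_eq_scan plateau X a (-1) (Y - (-1) * X) hnd]
      congr 1; funext i; norm_num; ring_nf
    · omega
    · -- X < a, Y < b : slope 1
      have hs : (X - a) * (Y - b) > 0 := mul_pos_of_neg_of_neg (by omega) (by omega)
      rw [if_pos hs, if_neg (by omega), if_neg (by omega), if_pos ⟨by omega, by omega⟩,
        pvLoopA_eq_all,
        min_eq_right (le_of_lt h1), max_eq_left (le_of_lt h1),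
        ← path_eq_scan plateau X a 1 (Y - 1 * X) hnd]
      congr 1; funext i; norm_num; ring_nf

-- ===== VERDICT (by name: the statement is the Claim_ definition above) =====
theorem traverse_fou_spec : Claim_equal_traverse_fou := by
  intro a b X Y plateau _ hpre
  unfold Spec_traverse_fou
  exact main_eq a b X Y plateau (by unfold Pre_traverse_fou at hpre; tauto)
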